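-- pv_equiv track=rewrite | github.com/blacksevenzqj/zoubo | 3_DataAnalysis/99_Data_analysis_competition/4_Kesci/1_xiecheng_customer_churn/MyLearn1.py | time_segmentation
-- ===== SOURCE A (Python) =====
-- time_period = [(0,(0,5)), (1,(5,6)), (2,(6,8)), (3,(8,11)), (4,(11,13)), (5,(13,17)), (6,(17,18)), (7,(18,24))]
--
-- def time_segmentation(x):
--     midle_index = len(time_period) // 2
--     start = time_period[midle_index][1][0]
--     end = time_period[midle_index][1][1]
--     if x >= start and x < end:
--         return time_period[midle_index][0]
--     elif x >= end:
--         for i in range(midle_index+1, len(time_period)):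
--             start = time_period[i][1][0]
--             end = time_period[i][1][1]
--             if x >= start and x < end:
--                 return time_period[i][0]
--     elif x < start:
--         for i in range(midle_index-1, -1, -1):
--             start = time_period[i][1][0]
--             end = time_period[i][1][1]
--             if x >= start and x < end:
--                 return time_period[i][0]
-- ===== SOURCE B (Python) =====
-- time_period = [(0,(0,5)), (1,(5,6)), (2,(6,8)), (3,(8,11)), (4,(11,13)), (5,(13,17)), (6,(17,18)), (7,(18,24))]
--
-- # left boundaries of the intervals, plus the final right boundary 24
-- _starts = [0, 5, 6, 8, 11, 13, 17, 18, 24]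
--
-- def time_segmentation(x):
--     # hand-rolled bisect_right over the boundary table
--     lo, hi = 0, len(_starts)
--     while lo < hi:
--         mid = (lo + hi) // 2
--         if x < _starts[mid]:
--             hi = mid
--         else:
--             lo = mid + 1
--     idx = lo - 1
--     if 0 <= idx < len(time_period):
--         return time_period[idx][0]
--     return None
-- ===== Notes on version B (the rewrite author's own statement) =====
-- stated objective: alternative
-- what changed: Replaced A's middle-out linear scan over the interval table with a hand-rolled bisect_right binary search over a precomputed left-boundary table.
import Mathlib
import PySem

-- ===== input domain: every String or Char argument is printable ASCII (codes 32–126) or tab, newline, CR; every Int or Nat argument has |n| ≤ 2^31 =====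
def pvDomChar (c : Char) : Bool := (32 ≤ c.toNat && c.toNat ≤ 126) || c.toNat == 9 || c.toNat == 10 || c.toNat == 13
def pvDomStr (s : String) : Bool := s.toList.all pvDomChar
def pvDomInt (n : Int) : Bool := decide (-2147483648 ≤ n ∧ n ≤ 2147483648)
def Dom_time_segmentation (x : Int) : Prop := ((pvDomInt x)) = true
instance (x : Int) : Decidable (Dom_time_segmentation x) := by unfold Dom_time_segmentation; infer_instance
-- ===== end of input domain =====

-- B replaces A's middle-out linear scan with a binary search over a precomputed boundary table (idiomatic bisect_right).


-- ===== PORT A =====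
def timePeriod : List (Int × (Int × Int)) :=
  [(0,(0,5)), (1,(5,6)), (2,(6,8)), (3,(8,11)), (4,(11,13)), (5,(13,17)), (6,(17,18)), (7,(18,24))]

-- the early-returning for-loop over a list of indices (shared shape of A's two scans)
def aScan (x : Int) : List Nat → Option Int
  | [] => none
  | i :: rest =>
    let e := timePeriod.getD i (0,(0,0))
    if x ≥ e.2.1 ∧ x < e.2.2 then some e.1 else aScan x rest

def time_segmentation (x : Int) : Option Int :=
  let midleIndex : Nat := timePeriod.length / 2
  let e := timePeriod.getD midleIndex (0,(0,0))
  if x ≥ e.2.1 ∧ x < e.2.2 then some e.1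
  else if x ≥ e.2.2 then
    aScan x (List.range' (midleIndex+1) (timePeriod.length - (midleIndex+1)))  -- range(mi+1, len)
  else if x < e.2.1 then
    aScan x [3, 2, 1, 0]  -- range(mi-1, -1, -1)
  else none

-- ===== PORT B =====
def bStarts : List Int := [0, 5, 6, 8, 11, 13, 17, 18, 24]

-- the while loop of B's hand-rolled bisect_right; fuel = bStarts.length bounds its iterations
def brLoop (x : Int) : Nat → Nat → Nat → Nat
  | 0, lo, _ => lo
  | f+1, lo, hi =>
    if lo < hi then
      let mid := (lo + hi) / 2
      if x < bStarts.getD mid 0 then brLoop x f lo mid else brLoop x f (mid+1) hi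
    else lo

def time_segmentation_alt (x : Int) : Option Int :=
  let lo := brLoop x bStarts.length 0 bStarts.length
  let idx : Int := (lo : Int) - 1
  if 0 ≤ idx ∧ idx < timePeriod.length then some (timePeriod.getD idx.toNat (0,(0,0))).1
  else none

-- ===== PRECONDITION & SPEC =====
def Spec_time_segmentation (x : Int) (out : Option Int) : Prop := out = time_segmentation_alt x
instance (x : Int) (out : Option Int) : Decidable (Spec_time_segmentation x out) := by unfold Spec_time_segmentation; infer_instance

-- ===== CLAIM (what is proved, stated in full; the proofs are below) =====
def Claim_equal_time_segmentation : Prop := ∀ (x : Int), Dom_time_segmentation x → Spec_time_segmentation x (time_segmentation x)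

-- ===== LEMMAS AND PROOFS =====

set_option maxHeartbeats 1000000 in
theorem ts_eq (x : Int) : time_segmentation x = time_segmentation_alt x := by
  by_cases h : 0 ≤ x ∧ x < 24
  · obtain ⟨h1, h2⟩ := h
    interval_cases x <;> decide
  · have hx : x < 0 ∨ 24 ≤ x := by omega
    have hr : List.range' 5 3 = [5, 6, 7] := rfl
    have hA : time_segmentation x = none := by
      norm_num [time_segmentation, timePeriod, hr, aScan]
      split_ifs <;> first | rfl | omega
    have hB : time_segmentation_alt x = none := by
      simp [time_segmentation_alt, brLoop, bStarts, timePeriod]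
      split_ifs <;> omega
    rw [hA, hB]

-- ===== VERDICT (by name: the statement is the Claim_ definition above) =====
theorem time_segmentation_spec : Claim_equal_time_segmentation := by
  intro x _
  unfold Spec_time_segmentation
  exact ts_eq x
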